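-- pv_equiv track=rewrite | github.com/Marghrid/FP | Exercicios/a04.py | num_para_seq_cod
-- ===== SOURCE A (Python) =====
-- def num_para_seq_cod (inteiro):
--     if isinstance(inteiro, int):
--         if inteiro%1 == 0 and inteiro >= 0:
--             divisor=1
--             codificado = ()
--             while divisor*10 <= inteiro:
--                 divisor = divisor * 10
--             while divisor >= 1:
--                 if (inteiro//divisor) % 2 == 0:
--                     codificado = codificado + (((inteiro//divisor) + 2) % 10,)
--                 else:
--                     codificado = codificado + (((inteiro//divisor) + 8) %10,)
--
--                 inteiro = inteiro%divisor
--                 divisor = divisor // 10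
--         else:
--             raise ValueError('num_para_seq_cod: Inteiro nao positivo')
--     else:
--         raise TypeError('num_para_seq_cod: Argumento nao é um número inteiro')
--
--     return codificado
-- ===== SOURCE B (Python) =====
-- def num_para_seq_cod(inteiro):
--     if not isinstance(inteiro, int):
--         raise TypeError('num_para_seq_cod: Argumento nao é um número inteiro')
--     if inteiro % 1 != 0 or inteiro < 0:
--         raise ValueError('num_para_seq_cod: Inteiro nao positivo')
--     return tuple((int(c) + (2 if int(c) % 2 == 0 else 8)) % 10 for c in str(int(inteiro)))
-- ===== Notes on version B (the rewrite author's own statement) =====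
-- stated objective: idiomatic
-- what changed: B obtains the MSB-first digits from the decimal string str(int(inteiro)) in a single tuple comprehension instead of A's power-of-ten divisor search followed by repeated floordiv/mod extraction with quadratic tuple concatenation.
import Mathlib
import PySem

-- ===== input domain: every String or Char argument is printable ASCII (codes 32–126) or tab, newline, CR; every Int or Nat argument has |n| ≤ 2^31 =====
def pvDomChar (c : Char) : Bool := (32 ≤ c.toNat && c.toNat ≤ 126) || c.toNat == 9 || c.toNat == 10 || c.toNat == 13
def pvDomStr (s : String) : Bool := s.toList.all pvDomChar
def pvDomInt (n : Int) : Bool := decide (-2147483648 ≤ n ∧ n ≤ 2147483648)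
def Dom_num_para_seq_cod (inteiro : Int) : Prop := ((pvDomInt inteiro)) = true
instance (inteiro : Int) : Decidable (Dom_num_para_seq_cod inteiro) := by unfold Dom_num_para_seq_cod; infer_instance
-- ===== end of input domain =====

-- B replaces A's power-of-ten divisor search and digit-extraction loop by a map over the
-- decimal string of the integer (idiomatic; same cost class on the bounded domain).


-- ===== PORT A =====
-- while divisor*10 <= inteiro: divisor = divisor*10   (0 < d is the loop invariant; the proof argument only serves termination)
def pvFindDiv (n d : Int) (hd : 0 < d) : Int :=
  if _h : d * 10 ≤ n then pvFindDiv n (d * 10) (by omega) else d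
termination_by (n - d).toNat
decreasing_by omega

-- while divisor >= 1: append encoded digit; inteiro %= divisor; divisor //= 10
def pvCodLoop (n d : Int) (acc : List Int) : List Int :=
  if _h : 1 ≤ d then
    pvCodLoop (PySem.Int.mod n d) (PySem.Int.floordiv d 10)
      (acc ++ [if PySem.Int.mod (PySem.Int.floordiv n d) 2 = 0
               then PySem.Int.mod (PySem.Int.floordiv n d + 2) 10
               else PySem.Int.mod (PySem.Int.floordiv n d + 8) 10])
  else acc
termination_by d.toNat
decreasing_by
  have h1 : PySem.Int.floordiv d 10 = d / 10 := PySem.Int.floordiv_eq_ediv_of_pos (by omega)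
  omega

def num_para_seq_cod (inteiro : Int) : List Int :=
  pvCodLoop inteiro (pvFindDiv inteiro 1 (by omega)) []

-- ===== PORT B =====
-- int(c) on the digit characters produced by str(n) is ported exactly as c.toNat - 48
def num_para_seq_cod_alt (inteiro : Int) : List Int :=
  (PySem.Int.toStr inteiro).toList.map (fun c =>
    PySem.Int.mod (((c.toNat : Int) - 48) +
      (if PySem.Int.mod ((c.toNat : Int) - 48) 2 = 0 then 2 else 8)) 10)

-- ===== PRECONDITION & SPEC =====
-- A raises ValueError for negative arguments (and TypeError for non-ints, outside the Int signature)
def Pre_num_para_seq_cod (inteiro : Int) : Prop := 0 ≤ inteiro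
instance (inteiro : Int) : Decidable (Pre_num_para_seq_cod inteiro) := by unfold Pre_num_para_seq_cod; infer_instance
def pvWitness_num_para_seq_cod : Int := (2025)

def Spec_num_para_seq_cod (inteiro : Int) (out : List Int) : Prop := out = num_para_seq_cod_alt inteiro
instance (inteiro : Int) (out : List Int) : Decidable (Spec_num_para_seq_cod inteiro out) := by unfold Spec_num_para_seq_cod; infer_instance

-- ===== CLAIM (what is proved, stated in full; the proofs are below) =====
def Claim_equal_num_para_seq_cod : Prop := ∀ (inteiro : Int), Dom_num_para_seq_cod inteiro → Pre_num_para_seq_cod inteiro → Spec_num_para_seq_cod inteiro (num_para_seq_cod inteiro)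

-- ===== LEMMAS AND PROOFS =====

-- the k least significant decimal digits of m, LSB first
def pvLsb : Nat → Nat → List Nat
  | 0, _ => []
  | k+1, m => m % 10 :: pvLsb k (m / 10)

lemma pvLsb_lt (k : Nat) : ∀ (m x : Nat), x ∈ pvLsb k m → x < 10 := by
  induction k with
  | zero => intro m x hx; simp [pvLsb] at hx
  | succ k ih =>
    intro m x hx
    simp only [pvLsb, List.mem_cons] at hx
    rcases hx with h | h
    · omega
    · exact ih _ _ h

lemma pvLsb_split (k : Nat) : ∀ m : Nat, m < 10^(k+1) →
    pvLsb (k+1) m = pvLsb k (m % 10^k) ++ [m / 10^k] := by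
  induction k with
  | zero =>
    intro m hm
    simp [pvLsb, Nat.mod_eq_of_lt (by simpa using hm)]
  | succ k ih =>
    intro m hm
    have h1 : (m % 10^(k+1)) % 10 = m % 10 := Nat.mod_mod_of_dvd m (dvd_pow_self 10 (by omega))
    have h2 : (m % 10^(k+1)) / 10 = (m / 10) % 10^k := by
      have := Nat.mod_mul_right_div_self m 10 (10^k)
      rw [← pow_succ'] at this
      exact this
    have h3 : (m / 10) / 10^k = m / 10^(k+1) := by
      rw [Nat.div_div_eq_div_mul, ← pow_succ']
    have hdiv : m / 10 < 10^(k+1) := by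
      rw [Nat.div_lt_iff_lt_mul (by norm_num)]
      calc m < 10^(k+1+1) := hm
        _ = 10^(k+1) * 10 := by ring
    calc pvLsb (k+2) m = m % 10 :: pvLsb (k+1) (m / 10) := rfl
      _ = m % 10 :: (pvLsb k ((m/10) % 10^k) ++ [(m/10) / 10^k]) := by rw [ih _ hdiv]
      _ = pvLsb (k+1) (m % 10^(k+1)) ++ [m / 10^(k+1)] := by
          simp [pvLsb, h1, h2, h3]

lemma pvToDigits_eq (k : Nat) : ∀ m : Nat, m < 10^(k+1) → (k = 0 ∨ 10^k ≤ m) →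
    Nat.toDigits 10 m = ((pvLsb (k+1) m).map Nat.digitChar).reverse := by
  induction k with
  | zero =>
    intro m hm _
    have hm10 : m < 10 := by simpa using hm
    rw [Nat.toDigits_of_lt_base hm10]
    simp [pvLsb, Nat.mod_eq_of_lt hm10]
  | succ k ih =>
    intro m hm hlb
    have hle : 10^(k+1) ≤ m := by
      rcases hlb with h | h
      · omega
      · exact h
    have h10 : (10:Nat) ≤ m := le_trans (by exact Nat.le_self_pow (by omega) 10) hle
    rw [Nat.toDigits_of_base_le (by norm_num) h10]
    have hdlt : m / 10 < 10^(k+1) := by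
      rw [Nat.div_lt_iff_lt_mul (by norm_num)]
      calc m < 10^(k+1+1) := hm
        _ = 10^(k+1) * 10 := by ring
    have hdge : 10^k ≤ m / 10 := by
      rw [Nat.le_div_iff_mul_le (by norm_num)]
      calc 10^k * 10 = 10^(k+1) := by ring
        _ ≤ m := hle
    rw [ih _ hdlt (Or.inr hdge)]
    simp [pvLsb]

lemma pvFindDiv_spec (n d : Int) (hd : 0 < d) :
    ∃ j : Nat, pvFindDiv n d hd = d * 10^j ∧ n < d * 10^(j+1) ∧ (j = 0 ∨ d * 10^j ≤ n) := by
  fun_induction pvFindDiv n d hd with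
  | case1 e he h ih =>
    obtain ⟨j, h1, h2, h3⟩ := ih
    refine ⟨j + 1, ?_, ?_, ?_⟩
    · rw [h1]; ring
    · calc n < e * 10 * 10^(j+1) := h2
        _ = e * 10^(j+1+1) := by ring
    · right
      rcases h3 with rfl | h3
      · simpa using h
      · calc e * 10^(j+1) = e * 10 * 10^j := by ring
          _ ≤ n := h3
  | case2 e he h =>
    exact ⟨0, by ring, by simpa using (by omega : n < e * 10), Or.inl rfl⟩

lemma pvCodLoop_eq (k : Nat) : ∀ (m : Nat) (acc : List Int), m < 10^(k+1) →
    pvCodLoop (m : Int) ((10:Int)^k) acc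
      = acc ++ (pvLsb (k+1) m).reverse.map (fun d : Nat =>
          if PySem.Int.mod (d:Int) 2 = 0 then PySem.Int.mod ((d:Int)+2) 10
          else PySem.Int.mod ((d:Int)+8) 10) := by
  induction k with
  | zero =>
    intro m acc hm
    have hm10 : m < 10 := by simpa using hm
    rw [pvCodLoop]
    simp only [pow_zero]
    have hfd : PySem.Int.floordiv (m:Int) 1 = (m:Int) := by
      rw [PySem.Int.floordiv_eq_ediv_of_pos (by omega)]; exact Int.ediv_one _
    have hmod : PySem.Int.mod (m:Int) 1 = 0 := by
      rw [PySem.Int.mod_eq_emod_of_pos (by omega)]; exact Int.emod_one _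
    have hfd10 : PySem.Int.floordiv (1:Int) 10 = 0 := by
      rw [PySem.Int.floordiv_eq_ediv_of_pos (by omega)]; decide
    rw [hfd, hmod, hfd10, pvCodLoop]
    simp [pvLsb, Nat.mod_eq_of_lt hm10]
  | succ k ih =>
    intro m acc hm
    have hcast : ((10:Int)^(k+1)) = ((10^(k+1) : Nat) : Int) := by push_cast; ring
    have hpos : (1:Int) ≤ (10:Int)^(k+1) := one_le_pow₀ (by omega)
    rw [pvCodLoop, dif_pos hpos]
    have hfd : PySem.Int.floordiv (m:Int) ((10:Int)^(k+1)) = ((m / 10^(k+1) : Nat) : Int) := by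
      rw [hcast]; exact PySem.Int.floordiv_natCast m (10^(k+1))
    have hmod : PySem.Int.mod (m:Int) ((10:Int)^(k+1)) = ((m % 10^(k+1) : Nat) : Int) := by
      rw [hcast]; exact PySem.Int.mod_natCast m (10^(k+1))
    have hfd10 : PySem.Int.floordiv ((10:Int)^(k+1)) 10 = (10:Int)^k := by
      rw [PySem.Int.floordiv_eq_ediv_of_pos (by omega), pow_succ]
      exact Int.mul_ediv_cancel _ (by omega)
    rw [hfd, hmod, hfd10, ih (m % 10^(k+1)) _ (Nat.mod_lt _ (by positivity))]
    rw [pvLsb_split (k+1) m hm]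
    simp

-- B's per-character transform agrees with A's per-digit transform on decimal digits
lemma pvDigit_map (d : Nat) (hd : d < 10) :
    PySem.Int.mod ((((Nat.digitChar d).toNat : Int) - 48) +
      (if PySem.Int.mod (((Nat.digitChar d).toNat : Int) - 48) 2 = 0 then 2 else 8)) 10
    = (if PySem.Int.mod (d:Int) 2 = 0 then PySem.Int.mod ((d:Int)+2) 10
       else PySem.Int.mod ((d:Int)+8) 10) := by
  interval_cases d <;> decide

-- ===== VERDICT (by name: the statement is the Claim_ definition above) =====
theorem num_para_seq_cod_spec : Claim_equal_num_para_seq_cod := by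
  intro inteiro _ hpre
  unfold Spec_num_para_seq_cod
  obtain ⟨m, rfl⟩ : ∃ m : Nat, inteiro = (m : Int) := ⟨inteiro.toNat, by simp [Pre_num_para_seq_cod] at hpre; omega⟩
  obtain ⟨j, hD, hub, hlb⟩ := pvFindDiv_spec (m : Int) 1 (by omega)
  rw [one_mul] at hD hub hlb
  have hmub : m < 10^(j+1) := by exact_mod_cast hub
  have hA : num_para_seq_cod (m : Int)
      = (pvLsb (j+1) m).reverse.map (fun d : Nat =>
          if PySem.Int.mod (d:Int) 2 = 0 then PySem.Int.mod ((d:Int)+2) 10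
          else PySem.Int.mod ((d:Int)+8) 10) := by
    rw [num_para_seq_cod, hD, pvCodLoop_eq j m [] hmub, List.nil_append]
  have hmlb : j = 0 ∨ 10^j ≤ m := by
    rcases hlb with h | h
    · exact Or.inl h
    · right; exact_mod_cast h
  have hB : num_para_seq_cod_alt (m : Int)
      = ((pvLsb (j+1) m).map Nat.digitChar).reverse.map (fun c =>
          PySem.Int.mod (((c.toNat : Int) - 48) +
            (if PySem.Int.mod ((c.toNat : Int) - 48) 2 = 0 then 2 else 8)) 10) := by
    rw [num_para_seq_cod_alt, PySem.Int.toList_toStr]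
    have : PySem.Int.toChars (m : Int) = Nat.toDigits 10 m := by
      simp [PySem.Int.toChars, Int.not_lt.mpr (Int.natCast_nonneg m)]
    rw [this, pvToDigits_eq j m hmub hmlb]
  rw [hA, hB, ← List.map_reverse, List.map_map]
  apply List.map_congr_left
  intro d hdmem
  have hd10 : d < 10 := pvLsb_lt (j+1) m d (List.mem_reverse.mp hdmem)
  exact (pvDigit_map d hd10).symm
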